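-- pv_equiv track=rewrite | github.com/pa-vpap/toy-protocols | B/protocol_b.py | build_past_from_reach
-- ===== SOURCE A (Python) =====
-- from typing import Dict, List, Tuple
--
-- def build_past_from_reach(N: int, reach: List[int]) -> List[int]:
--     past = [0] * N
--     for i in range(N):
--         x = reach[i]
--         while x:
--             lsb = x & -x
--             j = lsb.bit_length() - 1
--             past[j] |= (1 << i)
--             x ^= lsb
--     return past
-- ===== SOURCE B (Python) =====
-- from typing import Dict, List, Tuple
--
-- def build_past_from_reach(N: int, reach: List[int]) -> List[int]:
--     # Column-wise gather: past[j] collects bit j of every reach[i] as bit i.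
--     return [sum(((reach[i] >> j) & 1) << i for i in range(N)) for j in range(N)]
-- ===== Notes on version B (the rewrite author's own statement) =====
-- stated objective: simpler
-- what changed: Replaces A's row-wise scatter with an lsb-isolation while-loop (x & -x, bit_length) by a column-wise gather: past[j] is computed directly as the sum of bit j of each reach[i] shifted to position i, a two-line comprehension with no bit-isolation loop or in-place |= updates.
import Mathlib
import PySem

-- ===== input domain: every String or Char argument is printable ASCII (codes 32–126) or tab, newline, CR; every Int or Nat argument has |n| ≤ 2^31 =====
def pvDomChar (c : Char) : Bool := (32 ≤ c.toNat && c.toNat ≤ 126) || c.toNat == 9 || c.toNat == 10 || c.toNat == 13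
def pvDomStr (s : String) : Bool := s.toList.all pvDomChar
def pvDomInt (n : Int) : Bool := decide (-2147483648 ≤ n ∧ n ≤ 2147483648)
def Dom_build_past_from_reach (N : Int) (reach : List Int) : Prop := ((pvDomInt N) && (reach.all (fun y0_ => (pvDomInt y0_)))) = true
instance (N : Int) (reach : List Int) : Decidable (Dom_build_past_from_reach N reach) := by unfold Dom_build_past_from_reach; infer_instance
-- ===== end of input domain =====

-- B replaces A's row-wise scatter (lsb-isolation while-loop with in-place |=) by a direct
-- column-wise gather: past[j] is computed as the sum of bit j of each reach[i] shifted to position i (objective: simpler).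


-- ===== PORT A =====
-- Nat facts about x & (x-1) / the lowest set bit, needed by the port's termination proof (cited in decreasing_by)
theorem pvLSB (m : Nat) (hm : 0 < m) :
    ∃ k, m.testBit k = true ∧ m &&& (m-1) = m - 2^k ∧
      ∀ j, (m &&& (m-1)).testBit j = (m.testBit j && !(j == k)) := by
  induction m using Nat.strong_induction_on with
  | _ m ih =>
    rcases Nat.even_or_odd m with he | ho
    · -- even
      have h2 : m % 2 = 0 := Nat.even_iff.mp he
      obtain ⟨m', rfl⟩ : ∃ m', m = 2 * m' := ⟨m/2, by omega⟩
      have hm' : 0 < m' := by omega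
      obtain ⟨k, hbit, heq, hchar⟩ := ih m' (by omega) hm'
      have hpow : 2^k ≤ m' := Nat.ge_two_pow_of_testBit hbit
      have d1 : 2 * m' / 2 = m' := by omega
      have d2 : (2 * m' - 1) / 2 = m' - 1 := by omega
      have d3 : 2 * (m' &&& (m' - 1)) / 2 = m' &&& (m' - 1) := by omega
      have hdouble : (2*m') &&& (2*m' - 1) = 2 * (m' &&& (m' - 1)) := by
        apply Nat.eq_of_testBit_eq
        intro j
        cases j with
        | zero => simp [Nat.testBit_zero]
        | succ j =>
          rw [Nat.testBit_and, Nat.testBit_add_one, Nat.testBit_add_one,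
              Nat.testBit_add_one, d1, d2, d3, ← Nat.testBit_and]
      refine ⟨k+1, ?_, ?_, ?_⟩
      · rw [Nat.testBit_add_one, d1]; exact hbit
      · rw [hdouble, heq]; omega
      · intro j
        rw [hdouble]
        cases j with
        | zero => simp [Nat.testBit_zero]
        | succ j =>
          rw [Nat.testBit_add_one, Nat.testBit_add_one, d1, d3, hchar j]
          simp
    · -- odd
      have h1 : m % 2 = 1 := Nat.odd_iff.mp ho
      have dd : (m-1)/2 = m/2 := by omega
      have hand : m &&& (m-1) = m - 1 := by
        apply Nat.eq_of_testBit_eq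
        intro j
        cases j with
        | zero => simp [Nat.testBit_zero]; omega
        | succ j =>
          rw [Nat.testBit_and, Nat.testBit_add_one, Nat.testBit_add_one, dd, Bool.and_self]
      refine ⟨0, ?_, ?_, ?_⟩
      · simp [Nat.testBit_zero]; omega
      · rw [hand]; omega
      · intro j
        rw [hand]
        cases j with
        | zero => simp [Nat.testBit_zero]; omega
        | succ j =>
          rw [Nat.testBit_add_one, Nat.testBit_add_one, dd]
          simp

theorem pvXor_lsb (m k : Nat) (hbit : m.testBit k = true)
    (hchar : ∀ j, (m &&& (m-1)).testBit j = (m.testBit j && !(j == k))) :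
    m ^^^ 2^k = m &&& (m-1) := by
  apply Nat.eq_of_testBit_eq
  intro j
  rw [Nat.testBit_xor, Nat.testBit_two_pow, hchar j]
  by_cases h : j = k
  · subst h; simp [hbit]
  · simp [h, Ne.symm h]

theorem pvBand_neg (m : Nat) (hm : 0 < m) :
    PySem.Int.band (m : Int) (-(m : Int)) = ((m - (m &&& (m-1)) : Nat) : Int) := by
  have h1 : ¬ (0 ≤ -(m:Int)) := by omega
  have h2 : ((m:Int)).toNat = m := by omega
  have h3 : (-(-(m:Int)) - 1).toNat = m - 1 := by omega
  simp [PySem.Int.band, h2]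
  omega

theorem pvStep_lt (x : Int) (hx : 0 < x) :
    (PySem.Int.bxor x (PySem.Int.band x (-x))).toNat < x.toNat := by
  obtain ⟨m, rfl⟩ : ∃ m : Nat, x = (m : Int) := ⟨x.toNat, by omega⟩
  have hm : 0 < m := by omega
  obtain ⟨k, hbit, heq, hchar⟩ := pvLSB m hm
  have hpow : 2^k ≤ m := Nat.ge_two_pow_of_testBit hbit
  have h0 : 0 < 2^k := Nat.two_pow_pos k
  have hsub : m - (m &&& (m-1)) = 2^k := by omega
  rw [pvBand_neg m hm, hsub, PySem.Int.bxor_natCast, pvXor_lsb m k hbit hchar]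
  have hlt : m &&& (m-1) < m := by omega
  simpa using hlt

-- 'while x: lsb = x & -x; j = lsb.bit_length() - 1; past[j] |= (1 << i); x ^= lsb'
-- (guarded by 0 < x: on a negative x Python's loop never returns — such inputs are outside Pre_;
--  pyGetD/pySetD totalize past[j] — an out-of-range j is Python's IndexError, outside Pre_;
--  1 << i with i ≥ 0 from range(N) is 1 <<< i.toNat)
def pvLsbLoop (i : Int) (x : Int) (past : List Int) : List Int :=
  if h : 0 < x then
    let lsb := PySem.Int.band x (-x)
    let j : Nat := PySem.Int.bitLength lsb - 1
    let past' := PySem.List.pySetD past (j : Int)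
        (PySem.Int.bor (PySem.List.pyGetD past (j : Int) 0) ((1 : Int) <<< i.toNat))
    pvLsbLoop i (PySem.Int.bxor x lsb) past'
  else past
termination_by x.toNat
decreasing_by exact pvStep_lt x h

-- past = [0] * N; for i in range(N): x = reach[i]; <while loop>; return past
def build_past_from_reach (N : Int) (reach : List Int) : List Int :=
  (PySem.List.pyRange 0 N 1).foldl
    (fun past i => pvLsbLoop i (PySem.List.pyGetD reach i 0) past)
    (List.replicate N.toNat 0)

-- ===== PORT B =====
-- [sum(((reach[i] >> j) & 1) << i for i in range(N)) for j in range(N)]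
def build_past_from_reach_alt (N : Int) (reach : List Int) : List Int :=
  (PySem.List.pyRange 0 N 1).map (fun j =>
    ((PySem.List.pyRange 0 N 1).map (fun i =>
      (PySem.Int.band (PySem.List.pyGetD reach i 0 >>> j.toNat) 1) <<< i.toNat)).sum)

-- ===== PRECONDITION & SPEC =====
-- Pre_ excludes exactly the inputs on which Python A never returns: N > len(reach) or a reach[i]
-- (i < N) with a set bit at position ≥ N raise IndexError, and a negative reach[i] makes the
-- while-loop run forever.
def Pre_build_past_from_reach (N : Int) (reach : List Int) : Prop :=
  N ≤ (reach.length : Int) ∧ ∀ x ∈ reach.take N.toNat, 0 ≤ x ∧ x < 2 ^ N.toNat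
instance (N : Int) (reach : List Int) : Decidable (Pre_build_past_from_reach N reach) := by
  unfold Pre_build_past_from_reach; infer_instance
def pvWitness_build_past_from_reach : Int × List Int := (2, [3, 2])

def Spec_build_past_from_reach (N : Int) (reach : List Int) (out : List Int) : Prop :=
  out = build_past_from_reach_alt N reach
instance (N : Int) (reach : List Int) (out : List Int) : Decidable (Spec_build_past_from_reach N reach out) := by unfold Spec_build_past_from_reach; infer_instance

-- ===== CLAIM (what is proved, stated in full; the proofs are below) =====
def Claim_equal_build_past_from_reach : Prop := ∀ (N : Int) (reach : List Int), Dom_build_past_from_reach N reach → Pre_build_past_from_reach N reach → Spec_build_past_from_reach N reach (build_past_from_reach N reach)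

-- ===== LEMMAS AND PROOFS =====
theorem pvTB_div (x j : Nat) : x.testBit j = decide (x / 2^j % 2 = 1) := by
  have h := Nat.toNat_testBit x j
  cases hb : x.testBit j <;> simp [hb] at h ⊢ <;> omega

theorem pvBitLength_pow (k : Nat) : PySem.Int.bitLength ((2^k : Nat) : Int) = k + 1 := by
  induction k with
  | zero => decide
  | succ k ih =>
    rw [PySem.Int.bitLength_natCast (by positivity)]
    have : 2^(k+1)/2 = 2^k := by omega
    rw [this, ih]

theorem pvLoop_spec (i : Int) (m : Nat) (past : List Int)
    (hlen : ∀ j, m.testBit j = true → j < past.length) :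
    (pvLsbLoop i (m : Int) past).length = past.length ∧
    ∀ j : Nat, (pvLsbLoop i (m : Int) past).getD j 0 =
      if m.testBit j then PySem.Int.bor (past.getD j 0) ((1 : Int) <<< i.toNat)
      else past.getD j 0 := by
  induction m using Nat.strong_induction_on generalizing past with
  | _ m ih =>
    by_cases hm : 0 < m
    · obtain ⟨k, hbit, heq, hchar⟩ := pvLSB m hm
      have hpow : 2^k ≤ m := Nat.ge_two_pow_of_testBit hbit
      have h0 : 0 < 2^k := Nat.two_pow_pos k
      have hsub : m - (m &&& (m-1)) = 2^k := by omega
      have hklen : k < past.length := hlen k hbit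
      have hstep : pvLsbLoop i (m : Int) past =
          pvLsbLoop i ((m &&& (m-1) : Nat) : Int)
            (past.set k (PySem.Int.bor (past.getD k 0) ((1 : Int) <<< i.toNat))) := by
        rw [pvLsbLoop]
        have hpos : (0:Int) < (m:Int) := by omega
        rw [dif_pos hpos]
        simp only [pvBand_neg m hm, hsub, pvBitLength_pow k, Nat.add_sub_cancel,
          PySem.Int.bxor_natCast, pvXor_lsb m k hbit hchar,
          PySem.List.pySetD_natCast, PySem.List.pyGetD_natCast]
      have hlt : m &&& (m-1) < m := by omega
      have hlen' : ∀ j, (m &&& (m-1)).testBit j = true →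
          j < (past.set k (PySem.Int.bor (past.getD k 0) ((1 : Int) <<< i.toNat))).length := by
        intro j hj
        rw [List.length_set]
        rw [hchar j] at hj
        exact hlen j (by simpa using (Bool.and_elim_left hj))
      obtain ⟨ihlen, ihget⟩ := ih (m &&& (m-1)) hlt _ hlen'
      rw [hstep]
      constructor
      · rw [ihlen, List.length_set]
      · intro j
        rw [ihget j, hchar j]
        by_cases hjk : j = k
        · subst hjk
          simp [hbit, List.getD, hklen]
        · have hgd : (past.set k (PySem.Int.bor (past.getD k 0) ((1:Int) <<< i.toNat))).getD j 0
              = past.getD j 0 := by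
            simp only [List.getD]
            rw [List.getElem?_set]
            simp [Ne.symm hjk]
          simp only [List.getD] at hgd
          simp [hjk, hgd]
    · have hm0 : m = 0 := by omega
      subst hm0
      rw [pvLsbLoop]
      simp

theorem pvOr_pow (a k : Nat) (h : a < 2^k) : a ||| 2^k = a + 2^k := by
  apply Nat.eq_of_testBit_eq
  intro j
  rw [Nat.testBit_lor, Nat.testBit_two_pow]
  rcases lt_trichotomy j k with hj | hj | hj
  · have hne : ¬ (k = j) := by omega
    have hdiv : (a + 2^k) / 2^j = a / 2^j + 2^(k-j) := by
      have : 2^k = 2^(k-j) * 2^j := by rw [← Nat.pow_add]; congr 1; omega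
      rw [this, Nat.add_mul_div_right _ _ (Nat.two_pow_pos j)]
    have heven : 2^(k-j) % 2 = 0 := by
      have : 2^(k-j) = 2 * 2^(k-j-1) := by rw [← Nat.pow_succ']; congr 1; omega
      omega
    rw [pvTB_div, pvTB_div, hdiv]
    simp [hne]
    omega
  · subst hj
    have h1 : a.testBit j = false := Nat.testBit_lt_two_pow h
    have h2 : (a + 2^j).testBit j = true := by
      rw [pvTB_div]
      have : (a + 2^j) / 2^j = a / 2^j + 1 := by
        rw [Nat.add_div_right _ (Nat.two_pow_pos j)]
      rw [this]
      have : a / 2^j = 0 := Nat.div_eq_of_lt h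
      simp [this]
    simp [h1, h2]
  · have h1 : a.testBit j = false := by
      apply Nat.testBit_lt_two_pow
      calc a < 2^k := h
        _ ≤ 2^j := Nat.pow_le_pow_right (by omega) (by omega)
    have h2 : (a + 2^k).testBit j = false := by
      apply Nat.testBit_lt_two_pow
      calc a + 2^k < 2^k + 2^k := by omega
        _ = 2^(k+1) := by ring
        _ ≤ 2^j := Nat.pow_le_pow_right (by omega) (by omega)
    have hne : ¬ (k = j) := by omega
    simp [h1, h2, hne]

def pvS (vals : Nat → Nat) (j k : Nat) : Nat :=
  ((List.range k).map (fun i => if (vals i).testBit j then 2^i else 0)).sum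

theorem pvS_succ (vals : Nat → Nat) (j k : Nat) :
    pvS vals j (k+1) = pvS vals j k + (if (vals k).testBit j then 2^k else 0) := by
  unfold pvS
  rw [List.range_succ, List.map_append, List.sum_append]
  simp

theorem pvS_lt (vals : Nat → Nat) (j k : Nat) : pvS vals j k < 2^k := by
  induction k with
  | zero => simp [pvS]
  | succ k ih =>
    rw [pvS_succ]
    have : (if (vals k).testBit j then 2^k else 0) ≤ 2^k := by split <;> omega
    have h2 : (2:Nat)^(k+1) = 2^k + 2^k := by ring
    omega

theorem pvOuter (n : Nat) (reach : List Int)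
    (hval : ∀ i, i < n → 0 ≤ reach.getD i 0 ∧ (reach.getD i 0).toNat < 2^n) :
    ∀ k, k ≤ n →
      (((List.range k).foldl
          (fun past (i : Nat) => pvLsbLoop (i : Int) (PySem.List.pyGetD reach (i : Int) 0) past)
          (List.replicate n 0)).length = n ∧
       ∀ j, j < n →
        ((List.range k).foldl
          (fun past (i : Nat) => pvLsbLoop (i : Int) (PySem.List.pyGetD reach (i : Int) 0) past)
          (List.replicate n 0)).getD j 0
          = ((pvS (fun i => (reach.getD i 0).toNat) j k : Nat) : Int)) := by
  intro k
  induction k with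
  | zero =>
    intro _
    refine ⟨by simp, ?_⟩
    intro j hj
    simp [pvS, List.getD, hj]
  | succ k ih =>
    intro hk
    obtain ⟨ihlen, ihget⟩ := ih (by omega)
    rw [List.range_succ, List.foldl_append, List.foldl_cons, List.foldl_nil]
    have hvk := hval k (by omega)
    set prev := (List.range k).foldl
          (fun past (i : Nat) => pvLsbLoop (i : Int) (PySem.List.pyGetD reach (i : Int) 0) past)
          (List.replicate n 0) with hprev
    have hcast : PySem.List.pyGetD reach (k : Int) 0 = (((reach.getD k 0).toNat : Nat) : Int) := by
      have h0 := hvk.1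
      rw [PySem.List.pyGetD_natCast]
      omega
    set m := (reach.getD k 0).toNat with hm
    have hlen : ∀ j, m.testBit j = true → j < prev.length := by
      intro j hj
      rw [ihlen]
      by_contra hge
      have : m < 2^j := by
        calc m < 2^n := hvk.2
          _ ≤ 2^j := Nat.pow_le_pow_right (by omega) (by omega)
      rw [Nat.testBit_lt_two_pow this] at hj
      exact Bool.false_ne_true hj
    obtain ⟨slen, sget⟩ := pvLoop_spec (k : Int) m prev hlen
    rw [hcast]
    constructor
    · rw [slen, ihlen]
    · intro j hj
      rw [sget j, ihget j hj, pvS_succ]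
      have htn : ((k : Int)).toNat = k := by omega
      rw [htn]
      by_cases hb : m.testBit j
      · rw [if_pos hb, if_pos hb]
        have hsl : (1 : Int) <<< k = ((2^k : Nat) : Int) := by
          rw [Int.shiftLeft_eq]; push_cast; ring
        rw [hsl, PySem.Int.bor_natCast, pvOr_pow _ _ (pvS_lt _ j k)]
      · rw [if_neg hb, if_neg hb]
        simp

theorem pvB_term (x : Int) (hx : 0 ≤ x) (j : Nat) :
    PySem.Int.band (x >>> ((j : Nat) : Int)) 1 = ((if x.toNat.testBit j then 1 else 0 : Nat) : Int) := by
  obtain ⟨m, rfl⟩ : ∃ m : Nat, x = (m : Int) := ⟨x.toNat, by omega⟩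
  have h1 : ((m : Int) >>> ((j:Nat):Int)) = ((m >>> j : Nat) : Int) := Int.shiftRight_natCast m j
  have h2 : (1 : Int) = ((1 : Nat) : Int) := by norm_num
  rw [h1, h2, PySem.Int.band_natCast, Nat.and_one_is_mod, Nat.shiftRight_eq_div_pow]
  have h3 : ((m:Int)).toNat = m := by omega
  rw [h3]
  rcases Nat.mod_two_eq_zero_or_one (m / 2^j) with h | h <;> simp [pvTB_div, h]

theorem pvB_sum' (reach : List Int) (n j : Nat)
    (hval : ∀ i, i < n → 0 ≤ reach.getD i 0) :
    ((List.range n).map (fun i : Nat =>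
        (PySem.Int.band (PySem.List.pyGetD reach (i : Int) 0 >>> ((j : Nat) : Int)) 1) <<< ((i : Int)).toNat)).sum
      = ((pvS (fun i => (reach.getD i 0).toNat) j n : Nat) : Int) := by
  induction n with
  | zero => simp [pvS]
  | succ n ih =>
    rw [List.range_succ, List.map_append, List.sum_append, pvS_succ,
        ih (fun i hi => hval i (by omega))]
    simp only [List.map_cons, List.map_nil, List.sum_cons, List.sum_nil]
    have h0 := hval n (by omega)
    rw [PySem.List.pyGetD_natCast, pvB_term _ h0 j]
    have htn : ((n : Int)).toNat = n := by omega
    rw [htn, Int.shiftLeft_eq]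
    by_cases hb : (reach.getD n 0).toNat.testBit j <;> simp

theorem pvB_sum (reach : List Int) (n jn : Nat)
    (hval : ∀ i, i < n → 0 ≤ reach.getD i 0) :
    ((List.range n).map (fun i : Nat =>
        (PySem.Int.band (PySem.List.pyGetD reach (i : Int) 0 >>> ((((jn : Int)).toNat : Nat) : Int)) 1)
          <<< ((i : Int)).toNat)).sum
      = ((pvS (fun i => (reach.getD i 0).toNat) jn n : Nat) : Int) := by
  have h := pvB_sum' reach n jn hval
  simpa only [Int.toNat_natCast] using h

theorem pvMain (N : Int) (reach : List Int)
    (hpre1 : N ≤ (reach.length : Int))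
    (hpre2 : ∀ x ∈ reach.take N.toNat, 0 ≤ x ∧ x < 2 ^ N.toNat) :
    build_past_from_reach N reach = build_past_from_reach_alt N reach := by
  by_cases hN : 0 ≤ N
  · obtain ⟨n, rfl⟩ : ∃ n : Nat, N = (n : Int) := ⟨N.toNat, by omega⟩
    have htn : ((n : Int)).toNat = n := by omega
    have hnlen : n ≤ reach.length := by exact_mod_cast hpre1
    have hval : ∀ i, i < n → 0 ≤ reach.getD i 0 ∧ (reach.getD i 0).toNat < 2^n := by
      intro i hi
      have hilen : i < reach.length := by omega
      have hgd : reach.getD i 0 = reach[i] := List.getD_eq_getElem _ _ hilen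
      have hmem : reach[i] ∈ reach.take n := by
        have : (reach.take n)[i]'(by simp; omega) = reach[i] := List.getElem_take
        rw [← this]
        exact List.getElem_mem _
      have hx := hpre2 _ (by rwa [htn])
      have hp : ((2^n : Nat) : Int) = 2^(n:Int).toNat := by rw [htn]; push_cast; ring
      refine ⟨by omega, ?_⟩
      have : reach[i] < ((2^n : Nat) : Int) := by rw [hp]; exact hx.2
      omega
    obtain ⟨Alen, Aget⟩ := pvOuter n reach hval n (le_refl n)
    have hA : build_past_from_reach (n : Int) reach =
        (List.range n).foldl
          (fun past (i : Nat) => pvLsbLoop (i : Int) (PySem.List.pyGetD reach (i : Int) 0) past)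
          (List.replicate n 0) := by
      unfold build_past_from_reach
      rw [PySem.List.pyRange_zero_natCast, List.foldl_map, htn]
    have hB : build_past_from_reach_alt (n : Int) reach =
        (List.range n).map (fun j : Nat =>
          ((List.range n).map (fun i : Nat =>
            (PySem.Int.band (PySem.List.pyGetD reach (i : Int) 0 >>> ((((j : Int)).toNat : Nat) : Int)) 1)
              <<< ((i : Int)).toNat)).sum) := by
      unfold build_past_from_reach_alt
      rw [PySem.List.pyRange_zero_natCast, List.map_map]
      apply List.map_congr_left
      intro j _
      simp only [Function.comp_apply, Function.comp_def, List.map_map]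
    rw [hA, hB]
    apply List.ext_getElem
    · rw [Alen]; simp
    · intro j hj1 hj2
      have hjn : j < n := by rw [Alen] at hj1; exact hj1
      have hgd := Aget j hjn
      rw [List.getD_eq_getElem _ _ hj1] at hgd
      rw [hgd, List.getElem_map, List.getElem_range, pvB_sum reach n j (fun i hi => (hval i hi).1)]
  · have hzero : PySem.List.pyRange 0 N 1 = [] := by
      simp [PySem.List.pyRange]
      omega
    have htz : N.toNat = 0 := by omega
    unfold build_past_from_reach build_past_from_reach_alt
    rw [hzero, htz]
    simp

-- ===== VERDICT (by name: the statement is the Claim_ definition above) =====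
theorem build_past_from_reach_spec : Claim_equal_build_past_from_reach := by
  intro N reach _ hpre
  obtain ⟨h1, h2⟩ := hpre
  exact pvMain N reach h1 h2
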